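-- pv_equiv track=rewrite | github.com/smohapatra1/scripting | python/practice/start_again/2024/05312024/summing_pieces.py | summingPieces
-- ===== SOURCE A (Python) =====
-- def summingPieces(arr):
--     # Write your code here
--     mod = 10 ** 9 + 7
--     n = len(arr)
--     c = (pow(2, n, mod) - 1 ) % mod
--     v = (arr[0] * c ) % mod
--     for i in range(2, n+1):
--         c = ( c + pow(2, n-i, mod) - pow(2, i-2 , mod)) % mod
--         v = ( v + arr[i-1] * c ) % mod
--     return v
-- ===== SOURCE B (Python) =====
-- def summingPieces(arr):
--     mod = 10 ** 9 + 7
--     n = len(arr)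
--     return sum(x * ((3 * pow(2, n - 1, mod) - pow(2, i, mod) - pow(2, n - 1 - i, mod)) % mod)
--                for i, x in enumerate(arr)) % mod
-- ===== Notes on version B (the rewrite author's own statement) =====
-- stated objective: simpler
-- what changed: Replaces A's incremental coefficient recurrence (running c updated each iteration, first element special-cased) by the closed-form per-index coefficient 3*2^(n-1)-2^i-2^(n-1-i) mod p, computed independently for each position in a single sum over enumerate(arr).
import Mathlib
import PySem

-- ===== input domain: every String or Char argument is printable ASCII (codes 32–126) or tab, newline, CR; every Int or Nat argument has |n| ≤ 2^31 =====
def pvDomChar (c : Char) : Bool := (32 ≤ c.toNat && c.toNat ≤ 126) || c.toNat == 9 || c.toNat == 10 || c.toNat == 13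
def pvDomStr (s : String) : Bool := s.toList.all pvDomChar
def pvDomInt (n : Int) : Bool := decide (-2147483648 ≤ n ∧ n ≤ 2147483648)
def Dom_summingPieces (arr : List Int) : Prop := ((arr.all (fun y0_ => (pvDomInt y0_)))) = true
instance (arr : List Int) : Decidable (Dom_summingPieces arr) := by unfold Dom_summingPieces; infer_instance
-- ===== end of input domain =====

-- B replaces A's running-coefficient recurrence by a closed-form per-index coefficient (simpler decomposition; same cost).

-- shared helper: Python's pow(2, e, 10**9+7) for a nonnegative exponent
def pvM : Int := 1000000007
def pvPow2 (e : Nat) : Int := PySem.Int.mod ((2 : Int) ^ e) pvM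

-- ===== PORT A =====
-- The subscripts (first element and element i-1) are in range for every input admitted by Pre_,
-- so pyGetD's default is never used; exponents n-i and i-2 are ≥ 0 for i ∈ range(2, n+1).
def summingPieces (arr : List Int) : Int :=
  let n : Nat := arr.length
  let c : Int := PySem.Int.mod (pvPow2 n - 1) pvM
  let v : Int := PySem.Int.mod (PySem.List.pyGetD arr 0 0 * c) pvM
  ((PySem.List.pyRange 2 ((n : Int) + 1) 1).foldl
    (fun s i =>
      let c := PySem.Int.mod (s.1 + pvPow2 ((n : Int) - i).toNat - pvPow2 (i - 2).toNat) pvM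
      let v := PySem.Int.mod (s.2 + PySem.List.pyGetD arr (i - 1) 0 * c) pvM
      (c, v))
    (c, v)).2

-- ===== PORT B =====
def summingPieces_alt (arr : List Int) : Int :=
  let n : Nat := arr.length
  PySem.Int.mod
    ((PySem.List.enumerate arr).foldl
      (fun acc p =>
        acc + p.2 * PySem.Int.mod (3 * pvPow2 (n - 1) - pvPow2 p.1.toNat - pvPow2 (n - 1 - p.1.toNat)) pvM)
      0)
    pvM

-- ===== PRECONDITION & SPEC =====
-- A subscripts the first element unconditionally, so it raises IndexError on the empty list; Pre_ excludes exactly that input.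
def Pre_summingPieces (arr : List Int) : Prop := arr ≠ []
instance (arr : List Int) : Decidable (Pre_summingPieces arr) := by unfold Pre_summingPieces; infer_instance
def pvWitness_summingPieces : List Int := [3, -1, 4]

def Spec_summingPieces (arr : List Int) (out : Int) : Prop := out = summingPieces_alt arr
instance (arr : List Int) (out : Int) : Decidable (Spec_summingPieces arr out) := by unfold Spec_summingPieces; infer_instance

-- ===== CLAIM (what is proved, stated in full; the proofs are below) =====
def Claim_equal_summingPieces : Prop := ∀ (arr : List Int), Dom_summingPieces arr → Pre_summingPieces arr → Spec_summingPieces arr (summingPieces arr)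


-- ===== LEMMAS AND PROOFS =====

-- the coefficient of element i (0-indexed) in an array of length n, reduced mod pvM
def pvCoef (n i : Nat) : Int := (3 * (2 : Int) ^ (n - 1) - (2 : Int) ^ i - (2 : Int) ^ (n - 1 - i)) % pvM

-- weighted sum of the first k elements with pvCoef coefficients
def pvPsum (arr : List Int) (n k : Nat) : Int :=
  ((List.range k).map (fun j => arr.getD j 0 * pvCoef n j)).sum

theorem pvM_pos : (0 : Int) < pvM := by decide

theorem pymod_eq (a : Int) : PySem.Int.mod a pvM = a % pvM :=
  PySem.Int.mod_eq_emod_of_pos pvM_pos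

theorem pvBase (x : Int) : x % pvM ≡ x [ZMOD pvM] := Int.emod_emod_of_dvd x dvd_rfl

-- B's per-index coefficient equals pvCoef
theorem pvCoefB (n i : Nat) :
    PySem.Int.mod (3 * pvPow2 (n - 1) - pvPow2 i - pvPow2 (n - 1 - i)) pvM = pvCoef n i := by
  unfold pvPow2 pvCoef
  rw [pymod_eq, pymod_eq, pymod_eq, pymod_eq]
  exact (((pvBase _).mul_left 3).sub (pvBase _)).sub (pvBase _)

-- B computes the full weighted sum with closed-form coefficients
theorem altB (arr : List Int) :
    summingPieces_alt arr = pvPsum arr arr.length arr.length % pvM := by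
  unfold summingPieces_alt
  dsimp only
  rw [PySem.List.foldl_add (PySem.List.enumerate arr)
        (fun p : Int × Int => p.2 * PySem.Int.mod (3 * pvPow2 (arr.length - 1) - pvPow2 p.1.toNat - pvPow2 (arr.length - 1 - p.1.toNat)) pvM) 0]
  rw [pymod_eq]
  unfold pvPsum
  congr 1
  rw [zero_add]
  congr 1
  apply List.ext_getElem
  · simp [PySem.List.length_enumerate]
  · intro k hk1 hk2
    simp only [List.getElem_map, PySem.List.getElem_enumerate, List.getElem_range]
    have hk : k < arr.length := by simpa [PySem.List.length_enumerate] using hk1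
    rw [pvCoefB]
    simp [Int.toNat_natCast, List.getD_eq_getElem?_getD, List.getElem?_eq_getElem hk, mul_comm]

-- A's loop invariant: starting after the k-th element with c = pvCoef n (k-1) and
-- v = pvPsum k % m, the iterations for i = k+1 .. n end with v = pvPsum n % m.
theorem loopA (arr : List Int) (d k : Nat) (h1 : 1 ≤ k) (hd : arr.length = k + d) :
    ((PySem.List.pyRange ((k : Int) + 1) ((arr.length : Int) + 1) 1).foldl
      (fun s i =>
        let c := PySem.Int.mod (s.1 + pvPow2 ((arr.length : Int) - i).toNat - pvPow2 (i - 2).toNat) pvM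
        let v := PySem.Int.mod (s.2 + PySem.List.pyGetD arr (i - 1) 0 * c) pvM
        (c, v))
      (pvCoef arr.length (k - 1), pvPsum arr arr.length k % pvM))
    = (pvCoef arr.length (arr.length - 1), pvPsum arr arr.length arr.length % pvM) := by
  induction d generalizing k with
  | zero =>
    have hk : k = arr.length := by omega
    subst hk
    rw [PySem.List.pyRange_one_eq_nil (by omega)]
    rfl
  | succ d ih =>
    have hkn : k + 1 ≤ arr.length := by omega
    have hlt : (k : Int) + 1 < (arr.length : Int) + 1 := by omega
    rw [PySem.List.pyRange_one_cons hlt, List.foldl_cons]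
    have t1 : ((arr.length : Int) - ((k : Int) + 1)).toNat = arr.length - 1 - k := by omega
    have t2 : (((k : Int) + 1) - 2).toNat = k - 1 := by omega
    have hc : PySem.Int.mod (pvCoef arr.length (k - 1) + pvPow2 ((arr.length : Int) - ((k : Int) + 1)).toNat - pvPow2 (((k : Int) + 1) - 2).toNat) pvM = pvCoef arr.length k := by
      rw [t1, t2]
      unfold pvPow2 pvCoef
      rw [pymod_eq, pymod_eq, pymod_eq]
      have h : (((3 * (2:Int) ^ (arr.length - 1) - 2 ^ (k - 1) - 2 ^ (arr.length - 1 - (k - 1))) % pvM + (2:Int) ^ (arr.length - 1 - k) % pvM - (2:Int) ^ (k - 1) % pvM) % pvM)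
          = ((3 * (2:Int) ^ (arr.length - 1) - 2 ^ (k - 1) - 2 ^ (arr.length - 1 - (k - 1)) + (2:Int) ^ (arr.length - 1 - k) - (2:Int) ^ (k - 1)) % pvM) :=
        ((pvBase _).add (pvBase _)).sub (pvBase _)
      rw [h]
      congr 1
      have ek : (2:Int) ^ k = 2 ^ (k - 1) * 2 := by rw [← pow_succ]; congr 1; omega
      have en : (2:Int) ^ (arr.length - 1 - (k - 1)) = 2 ^ (arr.length - 1 - k) * 2 := by
        rw [← pow_succ]; congr 1; omega
      rw [ek, en]; ring
    have hg : PySem.List.pyGetD arr (((k : Int) + 1) - 1) 0 = arr.getD k 0 := by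
      have e : ((k : Int) + 1) - 1 = ((k : Nat) : Int) := by omega
      rw [e, PySem.List.pyGetD_natCast]
    have hv : PySem.Int.mod (pvPsum arr arr.length k % pvM + arr.getD k 0 * pvCoef arr.length k) pvM
        = pvPsum arr arr.length (k + 1) % pvM := by
      rw [pymod_eq, Int.emod_add_emod]
      congr 1
      unfold pvPsum
      rw [List.range_succ, List.map_append, List.sum_append]
      simp
    dsimp only
    rw [hc, hg, hv]
    have hrec := ih (k + 1) (by omega) (by omega)
    have hcast : (((k + 1 : Nat)) : Int) = (k : Int) + 1 := by push_cast; ring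
    rw [hcast, Nat.add_sub_cancel] at hrec
    exact hrec

-- ===== VERDICT (by name: the statement is the Claim_ definition above) =====
theorem summingPieces_spec : Claim_equal_summingPieces := by
  intro arr _ hpre
  unfold Spec_summingPieces
  have hn : 1 ≤ arr.length := by
    cases arr with
    | nil => exact absurd rfl hpre
    | cons a t => simp
  simp only [summingPieces]
  have hc0 : PySem.Int.mod (pvPow2 arr.length - 1) pvM = pvCoef arr.length 0 := by
    unfold pvPow2 pvCoef
    rw [pymod_eq, pymod_eq]
    have h : (((2:Int) ^ arr.length % pvM - 1) % pvM) = (((2:Int) ^ arr.length - 1) % pvM) :=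
      (pvBase _).sub (Int.ModEq.refl 1)
    rw [h]
    congr 1
    have e : (2:Int) ^ arr.length = 2 ^ (arr.length - 1) * 2 := by
      rw [← pow_succ]; congr 1; omega
    rw [e]; simp; ring
  rw [hc0]
  have hv0 : PySem.Int.mod (PySem.List.pyGetD arr 0 0 * pvCoef arr.length 0) pvM
      = pvPsum arr arr.length 1 % pvM := by
    rw [pymod_eq]
    unfold pvPsum
    have e : PySem.List.pyGetD arr (0 : Int) 0 = arr.getD 0 0 := by
      have e0 : (0 : Int) = ((0 : Nat) : Int) := rfl
      rw [e0, PySem.List.pyGetD_natCast]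
    simp [List.range_one, e]
  rw [hv0]
  have h := loopA arr (arr.length - 1) 1 (le_refl 1) (by omega)
  norm_num at h
  rw [altB]
  exact congrArg Prod.snd h
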